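-- pv_equiv track=rewrite | github.com/JPmarsxxxi/Jobs-application-automator | modules/automation/form_filler.py | _find_best_option_match
-- ===== SOURCE A (Python) =====
-- from typing import Dict, List, Optional, Any
--
-- def _find_best_option_match(value: str, options: List[str]) -> Optional[str]:
--     """Find best matching option from list"""
--     value_lower = value.lower()
--
--     # Exact match
--     for opt in options:
--         if opt.lower() == value_lower:
--             return opt
--
--     # Contains match
--     for opt in options:
--         if value_lower in opt.lower() or opt.lower() in value_lower:
--             return opt
--
--     return None
-- ===== SOURCE B (Python) =====
-- def _find_best_option_match(value, options):
--     """Single pass: return exact match immediately, remember first substring candidate."""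
--     value_lower = value.lower()
--     candidate = None
--     for opt in options:
--         ol = opt.lower()
--         if ol == value_lower:
--             return opt
--         if candidate is None and (value_lower in ol or ol in value_lower):
--             candidate = opt
--     return candidate
-- ===== Notes on version B (the rewrite author's own statement) =====
-- stated objective: alternative
-- what changed: Two sequential scans (exact-match pass, then substring pass) merged into one loop that returns exact matches immediately and retains the first substring candidate, lowercasing each option once.
import Mathlib
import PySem

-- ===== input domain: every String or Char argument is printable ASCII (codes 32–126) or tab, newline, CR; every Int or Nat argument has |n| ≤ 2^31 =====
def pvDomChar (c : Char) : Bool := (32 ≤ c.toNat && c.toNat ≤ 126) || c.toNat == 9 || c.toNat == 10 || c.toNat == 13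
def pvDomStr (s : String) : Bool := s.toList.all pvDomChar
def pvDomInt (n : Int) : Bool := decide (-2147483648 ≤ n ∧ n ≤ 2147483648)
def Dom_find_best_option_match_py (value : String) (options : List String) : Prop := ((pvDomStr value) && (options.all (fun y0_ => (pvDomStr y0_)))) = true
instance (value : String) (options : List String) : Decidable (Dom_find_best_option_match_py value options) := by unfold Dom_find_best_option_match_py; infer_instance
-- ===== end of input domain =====

-- B merges A's two sequential scans into one pass keeping the first substring candidate; return value proved equal.

-- ===== PORT A =====
-- the substring test of A's second loop: value_lower in opt.lower() or opt.lower() in value_lower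
def pvSubTest (vl ol : String) : Bool := PySem.Str.isIn vl ol || PySem.Str.isIn ol vl

def find_best_option_match_py (value : String) (options : List String) : Option String :=
  let value_lower := PySem.Str.lower value
  -- first loop: exact match (first opt with opt.lower() == value_lower)
  match options.find? (fun opt => PySem.Str.lower opt == value_lower) with
  | some o => some o
  | none =>
    -- second loop: contains match
    options.find? (fun opt => pvSubTest value_lower (PySem.Str.lower opt))

-- ===== PORT B =====
def pvAltLoop (vl : String) (cand : Option String) : List String → Option String
  | [] => cand
  | opt :: rest =>
    let ol := PySem.Str.lower opt
    if ol == vl then some opt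
    else pvAltLoop vl
      (if cand.isNone && pvSubTest vl ol then some opt else cand) rest

def find_best_option_match_py_alt (value : String) (options : List String) : Option String :=
  pvAltLoop (PySem.Str.lower value) none options

-- ===== PRECONDITION & SPEC =====
def Spec_find_best_option_match_py (value : String) (options : List String) (out : Option String) : Prop := out = find_best_option_match_py_alt value options
instance (value : String) (options : List String) (out : Option String) : Decidable (Spec_find_best_option_match_py value options out) := by unfold Spec_find_best_option_match_py; infer_instance

-- ===== CLAIM (what is proved, stated in full; the proofs are below) =====
def Claim_equal_find_best_option_match_py : Prop := ∀ (value : String) (options : List String), Dom_find_best_option_match_py value options → Spec_find_best_option_match_py value options (find_best_option_match_py value options)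

-- ===== LEMMAS AND PROOFS =====

-- loop invariant: B's single pass equals A's two-scan result with `cand` standing for
-- the substring candidate already found in the consumed prefix
theorem pvAltLoop_eq (vl : String) (cand : Option String) (opts : List String) :
    pvAltLoop vl cand opts =
      match opts.find? (fun opt => PySem.Str.lower opt == vl) with
      | some o => some o
      | none => cand.or (opts.find? (fun opt => pvSubTest vl (PySem.Str.lower opt))) := by
  induction opts generalizing cand with
  | nil => cases cand <;> simp [pvAltLoop]
  | cons opt rest ih =>
    simp only [pvAltLoop, List.find?]
    by_cases h : (PySem.Str.lower opt == vl) = true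
    · simp [h]
    · simp only [h, Bool.false_eq_true, if_false, ih]
      cases hf : rest.find? (fun opt => PySem.Str.lower opt == vl) with
      | some o => simp
      | none =>
        cases cand with
        | some c => simp
        | none => by_cases hs : pvSubTest vl (PySem.Str.lower opt) = true <;> simp [hs]

-- ===== VERDICT (by name: the statement is the Claim_ definition above) =====
theorem find_best_option_match_py_spec : Claim_equal_find_best_option_match_py := by
  intro value options _
  unfold Spec_find_best_option_match_py find_best_option_match_py find_best_option_match_py_alt
  rw [pvAltLoop_eq]
  cases hf : options.find? (fun opt => PySem.Str.lower opt == PySem.Str.lower value) <;> simp [hf]
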